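-- pv_equiv track=rewrite | github.com/ivan-sincek/wordlist-extender | src/wordlist_extender.py | append_char
-- ===== SOURCE A (Python) =====
-- def append_char(wordlist, charset, iterations = 1):
-- 	tmp = []
-- 	for word in wordlist:
-- 		for char in charset:
-- 			tmp.append(word + char)
-- 	iterations = iterations - 1
-- 	if iterations > 0:
-- 		tmp.extend(append_char(tmp, charset, iterations))
-- 	return tmp
-- ===== SOURCE B (Python) =====
-- def append_char(wordlist, charset, iterations = 1):
-- 	result = []
-- 	current = wordlist
-- 	for _ in range(max(iterations, 1)):
-- 		current = [word + char for word in current for char in charset]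
-- 		result += current
-- 	return result
-- ===== Notes on version B (the rewrite author's own statement) =====
-- stated objective: simpler
-- what changed: Replaces the self-recursive growth (each call rebuilds one level and recurses on its own output, appending) by a flat iterative loop over max(iterations,1) levels that extends one result list per level.
import Mathlib
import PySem

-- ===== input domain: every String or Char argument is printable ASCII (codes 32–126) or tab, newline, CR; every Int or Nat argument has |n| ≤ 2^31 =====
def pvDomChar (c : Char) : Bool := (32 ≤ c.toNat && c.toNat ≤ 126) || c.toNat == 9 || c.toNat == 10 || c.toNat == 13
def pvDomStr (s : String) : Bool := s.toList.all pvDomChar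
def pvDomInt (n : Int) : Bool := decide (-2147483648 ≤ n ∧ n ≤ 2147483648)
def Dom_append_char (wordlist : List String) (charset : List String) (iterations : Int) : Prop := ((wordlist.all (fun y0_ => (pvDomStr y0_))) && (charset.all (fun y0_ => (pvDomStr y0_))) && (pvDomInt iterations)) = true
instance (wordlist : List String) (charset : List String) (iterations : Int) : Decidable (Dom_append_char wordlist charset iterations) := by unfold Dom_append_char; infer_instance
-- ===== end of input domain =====

-- B replaces A's self-recursive level growth by a flat iterative loop over max(iterations,1) levels (simpler decomposition, same output).


-- ===== PORT A =====
-- literal transliteration: build tmp with the two nested loops, then recurse on tmp when iterations-1 > 0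
def append_char (wordlist : List String) (charset : List String) (iterations : Int) : List String :=
  let tmp := wordlist.foldl (fun acc word => charset.foldl (fun acc ch => acc ++ [word ++ ch]) acc) []
  if iterations - 1 > 0 then tmp ++ append_char tmp charset (iterations - 1) else tmp
termination_by iterations.toNat
decreasing_by omega

-- ===== PORT B =====
-- the list comprehension [word + char for word in current for char in charset]
def pyLevel (charset : List String) (current : List String) : List String :=
  current.flatMap (fun word => charset.map (fun ch => word ++ ch))

-- iterative: result=[], current=wordlist; max(iterations,1) times: current := level(current); result += current
def append_char_alt (wordlist : List String) (charset : List String) (iterations : Int) : List String :=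
  ((List.range (max iterations 1).toNat).foldl
    (fun st _ => let c := pyLevel charset st.2; (st.1 ++ c, c))
    (([] : List String), wordlist)).1

-- ===== PRECONDITION & SPEC =====
def Spec_append_char (wordlist : List String) (charset : List String) (iterations : Int) (out : List String) : Prop := out = append_char_alt wordlist charset iterations
instance (wordlist : List String) (charset : List String) (iterations : Int) (out : List String) : Decidable (Spec_append_char wordlist charset iterations out) := by unfold Spec_append_char; infer_instance

-- ===== CLAIM (what is proved, stated in full; the proofs are below) =====
def Claim_equal_append_char : Prop := ∀ (wordlist : List String) (charset : List String) (iterations : Int), Dom_append_char wordlist charset iterations → Spec_append_char wordlist charset iterations (append_char wordlist charset iterations)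

-- ===== LEMMAS AND PROOFS =====

-- concatenation of the successive levels, n of them
def gLevels (charset : List String) : Nat → List String → List String
  | 0, _ => []
  | n + 1, cur => pyLevel charset cur ++ gLevels charset n (pyLevel charset cur)

theorem foldl_inner (charset : List String) (w : String) (acc : List String) :
    charset.foldl (fun a ch => a ++ [w ++ ch]) acc = acc ++ charset.map (fun ch => w ++ ch) := by
  induction charset generalizing acc with
  | nil => simp
  | cons c cs ih => simp [List.foldl, ih]

theorem foldl_outer (charset wordlist : List String) (acc : List String) :
    wordlist.foldl (fun acc word => charset.foldl (fun a ch => a ++ [word ++ ch]) acc) acc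
      = acc ++ pyLevel charset wordlist := by
  induction wordlist generalizing acc with
  | nil => simp [pyLevel]
  | cons w ws ih =>
    rw [List.foldl_cons, foldl_inner, ih]
    simp [pyLevel]

theorem alt_fold (charset : List String) (l : List Nat) (acc cur : List String) :
    (l.foldl (fun st _ => let c := pyLevel charset st.2; (st.1 ++ c, c)) (acc, cur)).1
      = acc ++ gLevels charset l.length cur := by
  induction l generalizing acc cur with
  | nil => simp [gLevels]
  | cons x xs ih => simp [List.foldl, ih, gLevels]

theorem a_eq_gLevels (charset : List String) (k : Nat) :
    ∀ (it : Int), it.toNat ≤ k → ∀ wl, append_char wl charset it = gLevels charset (max it 1).toNat wl := by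
  induction k with
  | zero =>
    intro it h wl
    rw [append_char]
    have h1 : ¬ (1 < it) := by omega
    have h2 : (max it 1).toNat = 1 := by omega
    rw [foldl_outer, h2]
    simp [h1, gLevels]
  | succ k ih =>
    intro it h wl
    rw [append_char]
    rw [foldl_outer, List.nil_append]
    by_cases hgt : it - 1 > 0
    · have h2 : (max it 1).toNat = (max (it - 1) 1).toNat + 1 := by omega
      rw [if_pos hgt, ih (it - 1) (by omega), h2, gLevels]
    · have h2 : (max it 1).toNat = 1 := by omega
      rw [if_neg hgt, h2]
      simp [gLevels]

-- ===== VERDICT (by name: the statement is the Claim_ definition above) =====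
theorem append_char_spec : Claim_equal_append_char := by
  intro wl cs it _
  unfold Spec_append_char append_char_alt
  rw [alt_fold, List.length_range, a_eq_gLevels cs it.toNat it le_rfl, List.nil_append]
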